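-- pv_equiv track=rewrite | github.com/NicoLorenzo1/EncriptadoAlgebra | criptosistema.py | letra_mas_repetida
-- ===== SOURCE A (Python) =====
-- def letra_mas_repetida(mensaje):
--     diccionario = {}
--     letra_mas_repetida = ""
--
--     # Contar las apariciones de cada letra
--     for letra in mensaje:
--         if letra != " ":
--             if letra in diccionario:
--                 diccionario[letra] += 1
--             else:
--                 diccionario[letra] = 1
--
--     for letra in diccionario:
--         if letra_mas_repetida == "" or diccionario[letra] > diccionario[letra_mas_repetida]:
--             letra_mas_repetida = letra
--
--     posiciones = [i for i, l in enumerate(mensaje) if l == letra_mas_repetida]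
--
--     return letra_mas_repetida, posiciones
-- ===== SOURCE B (Python) =====
-- def letra_mas_repetida(mensaje):
--     posiciones = {}
--     for i, letra in enumerate(mensaje):
--         if letra != " ":
--             posiciones.setdefault(letra, []).append(i)
--     letra_ganadora, mejores = "", []
--     for letra, lista in posiciones.items():
--         if len(lista) > len(mejores):
--             letra_ganadora, mejores = letra, lista
--     return letra_ganadora, mejores
-- ===== Notes on version B (the rewrite author's own statement) =====
-- stated objective: alternative
-- what changed: B builds, in a single enumerate pass, a dict mapping each non-space character to the list of its positions, then picks the first longest list, so A's separate counting dict and final full-message position re-scan disappear.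
import Mathlib
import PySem

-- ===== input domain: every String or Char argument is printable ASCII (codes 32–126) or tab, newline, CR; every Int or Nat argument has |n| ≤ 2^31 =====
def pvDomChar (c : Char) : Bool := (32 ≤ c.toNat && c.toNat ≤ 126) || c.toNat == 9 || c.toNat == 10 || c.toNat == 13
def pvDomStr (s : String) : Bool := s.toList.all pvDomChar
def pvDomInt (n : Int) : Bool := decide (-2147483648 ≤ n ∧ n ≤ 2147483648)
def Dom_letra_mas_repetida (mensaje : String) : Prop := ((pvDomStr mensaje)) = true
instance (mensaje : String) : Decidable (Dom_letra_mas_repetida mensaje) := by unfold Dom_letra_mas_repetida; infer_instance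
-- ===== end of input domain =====

-- B replaces A's count-dict + final position re-scan by one enumerate pass grouping positions per letter; equal on all inputs.

-- ===== PORT A =====
-- loop body of A's first loop: count each non-space letter (Python dict keys are 1-char strings)
def pvStepA (d : PySem.Dict String Int) (letra : Char) : PySem.Dict String Int :=
  if String.singleton letra ≠ " " then
    match d.get? (String.singleton letra) with
    | some n => d.insert (String.singleton letra) (n + 1)
    | none   => d.insert (String.singleton letra) 1
  else d

-- loop body of A's second loop: keep the first key with a strictly larger count
def pvBestA (d : PySem.Dict String Int) (best : String) (letra : String) : String :=
  if best = "" ∨ d.getD letra 0 > d.getD best 0 then letra else best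

def letra_mas_repetida (mensaje : String) : String × List Int :=
  let diccionario : PySem.Dict String Int := mensaje.toList.foldl pvStepA PySem.Dict.empty
  let best : String := diccionario.keys.foldl (pvBestA diccionario) ""
  let posiciones : List Int :=
    ((PySem.List.enumerate mensaje.toList).filter
      (fun p => String.singleton p.2 = best)).map (fun p => p.1)
  (best, posiciones)

-- ===== PORT B =====
-- loop body of B's single pass: append the index to the letter's position list (setdefault+append = modify)
def pvStepB (d : PySem.Dict String (List Int)) (p : Int × Char) : PySem.Dict String (List Int) :=
  if String.singleton p.2 ≠ " " then
    d.modify (String.singleton p.2) [] (fun l => l ++ [p.1])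
  else d

-- loop body of B's second loop: keep the (letter, positions) pair with the strictly longest list
def pvBestB (acc : String × List Int) (kv : String × List Int) : String × List Int :=
  if kv.2.length > acc.2.length then kv else acc

def letra_mas_repetida_alt (mensaje : String) : String × List Int :=
  let posiciones : PySem.Dict String (List Int) :=
    (PySem.List.enumerate mensaje.toList).foldl pvStepB PySem.Dict.empty
  posiciones.items.foldl pvBestB ("", [])

-- ===== PRECONDITION & SPEC =====
def Spec_letra_mas_repetida (mensaje : String) (out : String × List Int) : Prop := out = letra_mas_repetida_alt mensaje
instance (mensaje : String) (out : String × List Int) : Decidable (Spec_letra_mas_repetida mensaje out) := by unfold Spec_letra_mas_repetida; infer_instance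

-- ===== CLAIM (what is proved, stated in full; the proofs are below) =====
def Claim_equal_letra_mas_repetida : Prop := ∀ (mensaje : String), Dom_letra_mas_repetida mensaje → Spec_letra_mas_repetida mensaje (letra_mas_repetida mensaje)

-- ===== LEMMAS AND PROOFS =====

lemma sg_ne_empty (a : Char) : String.singleton a ≠ "" := by
  intro h; have := congrArg String.toList h; simp at this

-- B's grouping pass: the list stored at a (non-space) key is the old list plus the indices of that letter
lemma getD_foldB (l : List (Int × Char)) (d : PySem.Dict String (List Int)) (k : String)
    (hk : k ≠ " ") :
    (l.foldl pvStepB d).getD k [] =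
      d.getD k [] ++ (l.filter (fun p => String.singleton p.2 = k)).map (fun p => p.1) := by
  induction l generalizing d with
  | nil => simp
  | cons p l ih =>
    rw [List.foldl_cons]
    by_cases hsp : String.singleton p.2 = " "
    · have hne : String.singleton p.2 ≠ k := by rw [hsp]; exact fun h => hk h.symm
      rw [List.filter_cons_of_neg (by simp [hne])]
      have hstep : pvStepB d p = d := by simp [pvStepB, hsp]
      rw [hstep, ih]
    · by_cases heq : String.singleton p.2 = k
      · rw [List.filter_cons_of_pos (by simp [heq])]
        have hstep : pvStepB d p = d.modify k [] (fun l => l ++ [p.1]) := by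
          simp [pvStepB, heq, hk]
        rw [hstep, ih _, PySem.Dict.getD_modify, if_pos rfl]
        simp
      · rw [List.filter_cons_of_neg (by simp [heq])]
        have hstep : pvStepB d p = d.modify (String.singleton p.2) [] (fun l => l ++ [p.1]) := by
          simp [pvStepB, hsp]
        rw [hstep, ih _, PySem.Dict.getD_modify, if_neg (fun h => heq h.symm)]

-- the joint invariant of A's counting pass and B's grouping pass
lemma AB_rel (cs : List Char) (s : Int) (dA : PySem.Dict String Int)
    (dB : PySem.Dict String (List Int))
    (h1 : dA.keys = dB.keys) (h2 : dB.keys.Nodup)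
    (h3 : ∀ k, dA.get? k = (dB.get? k).map (fun l => (l.length : Int)))
    (h4 : ∀ k l, dB.get? k = some l → l ≠ [] ∧ k ≠ "" ∧ k ≠ " ") :
    (cs.foldl pvStepA dA).keys = ((PySem.List.enumerate cs s).foldl pvStepB dB).keys ∧
    ((PySem.List.enumerate cs s).foldl pvStepB dB).keys.Nodup ∧
    (∀ k, (cs.foldl pvStepA dA).get? k =
      (((PySem.List.enumerate cs s).foldl pvStepB dB).get? k).map (fun l => (l.length : Int))) ∧
    (∀ k l, ((PySem.List.enumerate cs s).foldl pvStepB dB).get? k = some l →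
      l ≠ [] ∧ k ≠ "" ∧ k ≠ " ") := by
  induction cs generalizing s dA dB with
  | nil => simpa using ⟨h1, h2, h3, h4⟩
  | cons c cs ih =>
    rw [PySem.List.enumerate_cons]
    simp only [List.foldl_cons]
    by_cases hc : String.singleton c = " "
    · simp only [pvStepA, pvStepB, hc, ne_eq, not_true_eq_false, if_false]
      exact ih (s + 1) dA dB h1 h2 h3 h4
    · cases hB : dB.get? (String.singleton c) with
      | some l =>
        have hA : dA.get? (String.singleton c) = some ((l.length : Int)) := by
          rw [h3 _, hB]; rfl
        have hrelA : pvStepA dA c = dA.insert (String.singleton c) ((l.length : Int) + 1) := by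
          simp [pvStepA, hc, hA]
        have hrelB : pvStepB dB (s, c) = dB.insert (String.singleton c) (l ++ [s]) := by
          simp [pvStepB, hc, PySem.Dict.modify, PySem.Dict.getD_of_get?_eq_some _ _ hB]
        rw [hrelA, hrelB]
        apply ih
        · have hcA : dA.contains (String.singleton c) = true := by
            rw [PySem.Dict.contains_eq_isSome_get?, hA]; rfl
          have hcB : dB.contains (String.singleton c) = true := by
            rw [PySem.Dict.contains_eq_isSome_get?, hB]; rfl
          rw [PySem.Dict.keys_insert_of_contains _ _ hcA,
            PySem.Dict.keys_insert_of_contains _ _ hcB, h1]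
        · have hcB : dB.contains (String.singleton c) = true := by
            rw [PySem.Dict.contains_eq_isSome_get?, hB]; rfl
          rwa [PySem.Dict.keys_insert_of_contains _ _ hcB]
        · intro k
          rw [PySem.Dict.get?_insert, PySem.Dict.get?_insert]
          by_cases hkk : k = String.singleton c
          · subst hkk
            rw [if_pos rfl, if_pos rfl]
            simp only [Option.map_some, Option.some.injEq, List.length_append,
              List.length_cons, List.length_nil]
            push_cast
            ring
          · simp [hkk, h3 k]
        · intro k l' hget
          rw [PySem.Dict.get?_insert] at hget
          by_cases hkk : k = String.singleton c
          · rw [if_pos hkk] at hget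
            refine ⟨by simp [← Option.some_inj.mp hget], ?_, ?_⟩
            · rw [hkk]; exact sg_ne_empty c
            · rw [hkk]; exact hc
          · rw [if_neg hkk] at hget; exact h4 k l' hget
      | none =>
        have hA : dA.get? (String.singleton c) = none := by rw [h3 _, hB]; rfl
        have hrelA : pvStepA dA c = dA.insert (String.singleton c) 1 := by
          simp [pvStepA, hc, hA]
        have hrelB : pvStepB dB (s, c) = dB.insert (String.singleton c) [s] := by
          simp [pvStepB, hc, PySem.Dict.modify, PySem.Dict.getD_of_get?_eq_none _ _ hB]
        rw [hrelA, hrelB]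
        apply ih
        · have hcA : dA.contains (String.singleton c) = false := by
            rw [PySem.Dict.contains_eq_isSome_get?, hA]; rfl
          have hcB : dB.contains (String.singleton c) = false := by
            rw [PySem.Dict.contains_eq_isSome_get?, hB]; rfl
          rw [PySem.Dict.keys_insert_of_not_contains _ _ hcA,
            PySem.Dict.keys_insert_of_not_contains _ _ hcB, h1]
        · have hcB : dB.contains (String.singleton c) = false := by
            rw [PySem.Dict.contains_eq_isSome_get?, hB]; rfl
          rw [PySem.Dict.keys_insert_of_not_contains _ _ hcB]
          refine List.Nodup.append h2 (List.nodup_singleton _) ?_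
          intro a ha hb
          simp at hb
          subst hb
          rw [← PySem.Dict.contains_iff_mem_keys] at ha
          rw [hcB] at ha; exact Bool.false_ne_true ha
        · intro k
          rw [PySem.Dict.get?_insert, PySem.Dict.get?_insert]
          by_cases hkk : k = String.singleton c
          · simp [hkk]
          · simp [hkk, h3 k]
        · intro k l' hget
          rw [PySem.Dict.get?_insert] at hget
          by_cases hkk : k = String.singleton c
          · rw [if_pos hkk] at hget
            refine ⟨by simp [← Option.some_inj.mp hget], ?_, ?_⟩
            · rw [hkk]; exact sg_ne_empty c
            · rw [hkk]; exact hc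
          · rw [if_neg hkk] at hget; exact h4 k l' hget

-- the two argmax loops walk the same items and agree step by step
lemma argmax (dA : PySem.Dict String Int) (dB : PySem.Dict String (List Int))
    (h3 : ∀ k, dA.get? k = (dB.get? k).map (fun l => (l.length : Int))) :
    ∀ (its : List (String × List Int)) (best : String) (acc : String × List Int),
    (∀ kv ∈ its, dB.get? kv.1 = some kv.2 ∧ kv.2 ≠ [] ∧ kv.1 ≠ "") →
    best = acc.1 → (best = "" → acc.2 = []) → (best ≠ "" → dB.get? best = some acc.2) →
    its.foldl (fun b kv => pvBestA dA b kv.1) best = (its.foldl pvBestB acc).1 ∧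
    ((its.foldl pvBestB acc).1 = "" → (its.foldl pvBestB acc).2 = []) ∧
    ((its.foldl pvBestB acc).1 ≠ "" → dB.get? (its.foldl pvBestB acc).1 = some (its.foldl pvBestB acc).2) := by
  intro its
  induction its with
  | nil =>
    intro best acc hmem hb1 hb2 hb3
    subst hb1
    exact ⟨rfl, hb2, hb3⟩
  | cons kv its ih =>
    intro best acc hmem hb1 hb2 hb3
    obtain ⟨hget, hne, hk1⟩ := hmem kv (List.mem_cons_self)
    have hgAk : dA.getD kv.1 0 = (kv.2.length : Int) := by
      apply PySem.Dict.getD_of_get?_eq_some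
      rw [h3 kv.1, hget]; rfl
    have hmem' : ∀ p ∈ its, dB.get? p.1 = some p.2 ∧ p.2 ≠ [] ∧ p.1 ≠ "" :=
      fun p hp => hmem p (List.mem_cons_of_mem _ hp)
    simp only [List.foldl_cons]
    by_cases hbe : best = ""
    · have hacc2 : acc.2 = [] := hb2 hbe
      have hcondA : pvBestA dA best kv.1 = kv.1 := by simp [pvBestA, hbe]
      have hcondB : pvBestB acc kv = kv := by
        simp [pvBestB, hacc2, List.length_pos_iff, hne]
      rw [hcondA, hcondB]
      exact ih kv.1 kv (fun p hp => hmem' p hp) rfl (fun h => absurd h hk1)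
        (fun _ => hget)
    · have hgetb := hb3 hbe
      have hgAb : dA.getD best 0 = (acc.2.length : Int) := by
        apply PySem.Dict.getD_of_get?_eq_some
        rw [h3 best, hgetb]; rfl
      by_cases hlt : kv.2.length > acc.2.length
      · have hcondA : pvBestA dA best kv.1 = kv.1 := by
          simp only [pvBestA, hgAk, hgAb]
          rw [if_pos (Or.inr (by exact_mod_cast hlt))]
        have hcondB : pvBestB acc kv = kv := by simp [pvBestB, hlt]
        rw [hcondA, hcondB]
        exact ih kv.1 kv (fun p hp => hmem' p hp) rfl (fun h => absurd h hk1)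
          (fun _ => hget)
      · have hcondA : pvBestA dA best kv.1 = best := by
          simp only [pvBestA, hgAk, hgAb]
          rw [if_neg]
          push Not
          exact ⟨hbe, by exact_mod_cast Nat.le_of_not_lt hlt⟩
        have hcondB : pvBestB acc kv = acc := by simp [pvBestB, hlt]
        rw [hcondA, hcondB]
        exact ih best acc (fun p hp => hmem' p hp) hb1 hb2 hb3

-- ===== VERDICT (by name: the statement is the Claim_ definition above) =====
theorem letra_mas_repetida_spec : Claim_equal_letra_mas_repetida := by
  intro mensaje _
  unfold Spec_letra_mas_repetida
  show letra_mas_repetida mensaje = letra_mas_repetida_alt mensaje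
  obtain ⟨h1, h2, h3, h4⟩ := AB_rel mensaje.toList 0 PySem.Dict.empty PySem.Dict.empty
    (by simp) (by simp) (fun k => by simp) (fun k l h => by simp at h)
  simp only [letra_mas_repetida, letra_mas_repetida_alt]
  set dA := mensaje.toList.foldl pvStepA PySem.Dict.empty with hdA
  set dB := (PySem.List.enumerate mensaje.toList 0).foldl pvStepB PySem.Dict.empty with hdB
  have hfoldA : dA.keys.foldl (pvBestA dA) "" =
      dB.items.foldl (fun b kv => pvBestA dA b kv.1) "" := by
    rw [h1]
    simp only [PySem.Dict.keys]
    rw [List.foldl_map]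
  have hmem : ∀ kv ∈ dB.items, dB.get? kv.1 = some kv.2 ∧ kv.2 ≠ [] ∧ kv.1 ≠ "" := by
    intro kv hkv
    have hg : dB.get? kv.1 = some kv.2 := PySem.Dict.get?_of_mem_items _ hkv h2
    exact ⟨hg, (h4 kv.1 kv.2 hg).1, (h4 kv.1 kv.2 hg).2.1⟩
  obtain ⟨he, he2, he3⟩ := argmax dA dB h3 dB.items "" ("", []) hmem rfl
    (fun _ => rfl) (fun h => absurd rfl h)
  set rB := dB.items.foldl pvBestB ("", []) with hrB
  rw [hfoldA, he]
  by_cases hr : rB.1 = ""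
  · have hfil : (PySem.List.enumerate mensaje.toList 0).filter
        (fun p => decide (String.singleton p.2 = rB.1)) = [] := by
      rw [hr]
      apply List.filter_eq_nil_iff.mpr
      intro p _
      simp [sg_ne_empty p.2]
    rw [hfil]
    exact Prod.ext rfl (by simp [he2 hr])
  · have hg := he3 hr
    have hsp : rB.1 ≠ " " := (h4 rB.1 rB.2 hg).2.2
    have hlem := getD_foldB (PySem.List.enumerate mensaje.toList 0) PySem.Dict.empty rB.1 hsp
    rw [← hdB, PySem.Dict.getD_of_get?_eq_some _ _ hg] at hlem
    simp only [PySem.Dict.getD_empty, List.nil_append] at hlem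
    exact Prod.ext rfl (by rw [← hlem])
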